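-- pv_equiv track=rewrite | github.com/costas-basdekis/aox | aox/command_line/command.py | align_rows
-- ===== SOURCE A (Python) =====
-- def align_rows(rows):
--     row_sizes = set(map(len, rows))
--     if len(row_sizes) != 1:
--         raise Exception(
--             f"Expected rows of equal size but got multiple sizes: "
--             f"{', '.join(map(str, sorted(row_sizes)))}")
--     column_lengths = tuple(
--         max(map(len, column))
--         for column in zip(*rows)
--     )
--     column_formats = tuple(
--         f"{{: <{column_length}}}"
--         for column_length in column_lengths
--     )
--
--     return [
--         tuple(
--             _format.format(cell)
--             for _format, cell in zip(column_formats, row)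
--         )
--         for row in rows
--     ]
-- ===== SOURCE B (Python) =====
-- def align_rows(rows):
--     row_sizes = set(map(len, rows))
--     if len(row_sizes) != 1:
--         raise Exception(
--             f"Expected rows of equal size but got multiple sizes: "
--             f"{', '.join(map(str, sorted(row_sizes)))}")
--     aligned = []
--     widths = [0] * len(rows[0])
--     for row in rows:
--         new_widths = [max(w, len(c)) for w, c in zip(widths, row)]
--         if new_widths != widths:
--             aligned = [tuple(c.ljust(w) for c, w in zip(r, new_widths))
--                        for r in aligned]
--             widths = new_widths
--         aligned.append(tuple(c.ljust(w) for c, w in zip(row, widths)))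
--     return aligned
-- ===== Notes on version B (the rewrite author's own statement) =====
-- stated objective: alternative
-- what changed: B replaces A's two-phase transpose-then-format (compute all column maxima via zip(*rows), then format every row) with an online single pass that appends each row padded to the running column maxima and retroactively re-pads the already-emitted rows whenever a column widens.
import Mathlib
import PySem

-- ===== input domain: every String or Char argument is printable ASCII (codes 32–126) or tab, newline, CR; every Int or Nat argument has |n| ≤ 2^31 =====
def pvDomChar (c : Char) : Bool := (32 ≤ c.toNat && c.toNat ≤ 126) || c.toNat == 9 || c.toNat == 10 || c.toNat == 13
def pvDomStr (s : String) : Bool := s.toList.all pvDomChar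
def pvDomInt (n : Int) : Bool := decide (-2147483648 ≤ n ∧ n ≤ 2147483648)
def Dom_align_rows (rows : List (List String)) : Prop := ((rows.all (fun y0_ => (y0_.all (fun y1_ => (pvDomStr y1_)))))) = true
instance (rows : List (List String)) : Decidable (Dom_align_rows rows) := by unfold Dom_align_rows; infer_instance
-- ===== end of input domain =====

-- B is an online single pass: each row is appended padded to the running column maxima,
-- and already-emitted rows are retroactively re-padded when a column widens, instead of
-- A's two-phase transpose-then-format (objective: alternative algorithm, same result).

def slen (s : String) : Int := PySem.Str.len s

-- ===== PORT A =====

-- zip(*rows): columns of `rows`, stopping at the shortest row (exact for Python's zip)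
def pyZipStar (rows : List (List String)) : List (List String) :=
  if rows.isEmpty || rows.any List.isEmpty then []
  else (rows.map (fun r => r.headD "")) :: pyZipStar (rows.map List.tail)
termination_by (rows.headD []).length
decreasing_by
  rename_i h
  simp only [Bool.or_eq_true, List.isEmpty_iff, List.any_eq_true, not_or] at h
  obtain ⟨h1, h2⟩ := h
  cases rows with
  | nil => exact absurd rfl h1
  | cons r rest =>
    cases r with
    | nil => exact absurd ⟨[], by simp, rfl⟩ h2
    | cons a r' => simp

-- max(map(len, column)) — Python's max on a nonempty iterable ([] unreachable in A)
def maxOf (col : List String) : Int :=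
  match col with
  | [] => 0
  | c :: cs => (cs.map slen).foldl max (slen c)

-- '{: <w}'.format(cell): left-align cell in a field of width w, padding with spaces
def padCell (w : Int) (c : String) : String :=
  String.ofList (c.toList ++ List.replicate (w - slen c).toNat ' ')

def align_rows (rows : List (List String)) : List (List String) :=
  let row_sizes : PySem.Set Int := PySem.Set.ofList (rows.map (fun r => (r.length : Int)))
  if row_sizes.length ≠ 1 then []  -- Python raises Exception here; such inputs are outside Pre_
  else
    let column_lengths := (pyZipStar rows).map maxOf
    rows.map (fun row => List.zipWith (fun w c => padCell w c) column_lengths row)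

-- ===== PORT B =====

-- cell.ljust(w)
def ljust (c : String) (w : Int) : String :=
  if slen c < w then String.ofList (c.toList ++ List.replicate (w - slen c).toNat ' ') else c

-- tuple(c.ljust(w) for c, w in zip(r, ws))
def padRow (ws : List Int) (r : List String) : List String :=
  List.zipWith ljust r ws

-- [max(w, len(c)) for w, c in zip(widths, row)]
def wstep (ws : List Int) (row : List String) : List Int :=
  List.zipWith (fun w c => max w (slen c)) ws row

-- loop body: update running widths, re-pad emitted rows if a column widened, append row
def bstep (st : List (List String) × List Int) (row : List String) :
    List (List String) × List Int :=
  let nws := wstep st.2 row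
  if nws ≠ st.2 then (st.1.map (padRow nws) ++ [padRow nws row], nws)
  else (st.1 ++ [padRow st.2 row], st.2)

def align_rows_alt (rows : List (List String)) : List (List String) :=
  let row_sizes : PySem.Set Int := PySem.Set.ofList (rows.map (fun r => (r.length : Int)))
  if row_sizes.length ≠ 1 then []  -- same validation as A; outside Pre_
  else
    (rows.foldl bstep ([], List.replicate (rows.headD []).length 0)).1

-- ===== PRECONDITION & SPEC =====
-- Pre_ excludes exactly the inputs where A raises: empty `rows` or rows of unequal lengths.
def Pre_align_rows (rows : List (List String)) : Prop :=
  rows ≠ [] ∧ ∀ r ∈ rows, r.length = (rows.headD []).length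
instance (rows : List (List String)) : Decidable (Pre_align_rows rows) := by
  unfold Pre_align_rows; infer_instance

def pvWitness_align_rows : List (List String) := [["a", "bb"], ["ccc", ""]]

def Spec_align_rows (rows : List (List String)) (out : List (List String)) : Prop :=
  out = align_rows_alt rows
instance (rows : List (List String)) (out : List (List String)) : Decidable (Spec_align_rows rows out) := by
  unfold Spec_align_rows; infer_instance

-- ===== CLAIM (what is proved, stated in full; the proofs are below) =====
def Claim_equal_align_rows : Prop :=
  ∀ (rows : List (List String)), Dom_align_rows rows → Pre_align_rows rows →
    Spec_align_rows rows (align_rows rows)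

-- ===== LEMMAS AND PROOFS =====

theorem slen_nonneg (s : String) : 0 ≤ slen s := by
  simp [slen, PySem.Str.len_eq]

theorem foldl_max_shift (l : List Int) (a b : Int) :
    l.foldl max (max a b) = max a (l.foldl max b) := by
  induction l generalizing b with
  | nil => simp
  | cons x xs ih => simp only [List.foldl_cons, max_assoc, ih]

theorem maxOf_cons (c : String) (col : List String) :
    maxOf (c :: col) = max (slen c) (maxOf col) := by
  cases col with
  | nil => simp [maxOf, max_eq_left (slen_nonneg c)]
  | cons d ds =>
    simp only [maxOf, List.map_cons, List.foldl_cons]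
    exact foldl_max_shift _ _ _

theorem zipStar_eq_nil (rows : List (List String)) (h : rows.any List.isEmpty = true) :
    pyZipStar rows = [] := by
  conv_lhs => rw [pyZipStar]
  simp [h]

theorem zipStar_unfold_pos (rows : List (List String)) (h1 : rows ≠ [])
    (h2 : rows.any List.isEmpty = false) :
    pyZipStar rows = (rows.map (fun r => r.headD "")) :: pyZipStar (rows.map List.tail) := by
  conv_lhs => rw [pyZipStar]
  simp [h1, h2]

theorem zipStar_single (r : List String) : pyZipStar [r] = r.map (fun c => [c]) := by
  induction r with
  | nil => exact zipStar_eq_nil _ (by simp)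
  | cons a r' ih =>
    rw [zipStar_unfold_pos [a :: r'] (by simp) (by simp)]
    simp [ih]

theorem zipStar_cons (r : List String) (rest : List (List String)) (h : rest ≠ []) :
    pyZipStar (r :: rest) = List.zipWith List.cons r (pyZipStar rest) := by
  induction r generalizing rest with
  | nil => simp [zipStar_eq_nil (([] : List String) :: rest) (by simp)]
  | cons a r' ih =>
    by_cases hmt : rest.any List.isEmpty = true
    · rw [zipStar_eq_nil ((a :: r') :: rest) (by simp [hmt]), zipStar_eq_nil rest hmt]
      simp
    · have hmt' : rest.any List.isEmpty = false := Bool.eq_false_iff.mpr hmt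
      rw [zipStar_unfold_pos ((a :: r') :: rest) (by simp) (by simp [hmt']),
        zipStar_unfold_pos rest h hmt']
      have hne : rest.map List.tail ≠ [] := by simpa using h
      simp [ih _ hne]

theorem wstep_replicate (r : List String) :
    wstep (List.replicate r.length 0) r = r.map slen := by
  unfold wstep
  induction r with
  | nil => simp
  | cons c cs ih =>
    simp [List.replicate_succ, ih, max_eq_right (slen_nonneg c)]

theorem colsMax_cons (r : List String) (rest : List (List String)) (h : rest ≠ []) :
    (pyZipStar (r :: rest)).map maxOf
      = List.zipWith (fun c m => max (slen c) m) r ((pyZipStar rest).map maxOf) := by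
  rw [zipStar_cons r rest h, List.map_zipWith]
  rw [List.zipWith_map_right]
  simp only [maxOf_cons]

theorem zipWith_max_assoc (ws : List Int) (r : List String) (cm : List Int) :
    List.zipWith max ws (List.zipWith (fun c m => max (slen c) m) r cm)
      = List.zipWith max (wstep ws r) cm := by
  unfold wstep
  induction ws generalizing r cm with
  | nil => simp
  | cons w ws ih =>
    cases r with
    | nil => simp
    | cons c r =>
      cases cm with
      | nil => simp
      | cons m cm => simp [ih, max_assoc]

-- the width fold over `rest` computes `max ws (column maxima of rest)`
theorem foldl_wstep_eq (rest : List (List String)) (h : rest ≠ []) (ws : List Int) :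
    rest.foldl wstep ws = List.zipWith max ws ((pyZipStar rest).map maxOf) := by
  induction rest generalizing ws with
  | nil => exact absurd rfl h
  | cons r rest ih =>
    cases rest with
    | nil =>
      simp only [List.foldl_cons, List.foldl_nil, zipStar_single, List.map_map]
      rw [show (maxOf ∘ fun c => [c]) = slen by funext c; rfl]
      simp [wstep, List.zipWith_map_right]
    | cons r2 rest2 =>
      rw [List.foldl_cons, ih (by simp) _, colsMax_cons r (r2 :: rest2) (by simp),
        zipWith_max_assoc]

theorem widths_eq (r : List String) (rest : List (List String)) :
    (r :: rest).foldl wstep (List.replicate r.length 0)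
      = (pyZipStar (r :: rest)).map maxOf := by
  cases rest with
  | nil =>
    simp only [List.foldl_cons, List.foldl_nil, wstep_replicate, zipStar_single, List.map_map]
    rw [show (maxOf ∘ fun c => [c]) = slen by funext c; rfl]
  | cons r2 rest2 =>
    rw [List.foldl_cons, wstep_replicate, foldl_wstep_eq (r2 :: rest2) (by simp),
      colsMax_cons r (r2 :: rest2) (by simp), List.zipWith_map_left]

theorem ljust_eq_pad (c : String) (w : Int) : ljust c w = padCell w c := by
  unfold ljust padCell
  split_ifs with h
  · rfl
  · have : (w - slen c).toNat = 0 := by omega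
    simp [this, String.ofList_toList]

theorem slen_ofList (l : List Char) : slen (String.ofList l) = l.length := by
  simp [slen, PySem.Str.len_eq]

theorem toList_ofList_chars (l : List Char) : (String.ofList l).toList = l := by simp

theorem ljust_ljust (c : String) (w w' : Int) (h : w ≤ w') :
    ljust (ljust c w) w' = ljust c w' := by
  unfold ljust
  by_cases h1 : slen c < w
  · simp only [h1, if_true]
    have hlen : slen (String.ofList (c.toList ++ List.replicate (w - slen c).toNat ' ')) = w := by
      rw [slen_ofList]
      have : (c.toList.length : Int) = slen c := by simp [slen, PySem.Str.len_eq]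
      simp only [List.length_append, List.length_replicate]
      push_cast
      omega
    by_cases h2 : w < w'
    · have hlt : slen (String.ofList (c.toList ++ List.replicate (w - slen c).toNat ' ')) < w' := by
        omega
      have hcw' : slen c < w' := by omega
      simp only [hlt, if_true, hcw', if_true]
      rw [toList_ofList_chars, hlen, List.append_assoc, ← List.replicate_add]
      congr 3
      omega
    · have hw : w = w' := by omega
      subst hw
      have hnlt : ¬ slen (String.ofList (c.toList ++ List.replicate (w - slen c).toNat ' ')) < w := by
        omega
      simp only [hnlt, if_false]
      rw [if_pos h1]
  · simp only [h1, if_false]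

theorem padRow_padRow (ws nws : List Int) (r : List String)
    (hmono : List.Forall₂ (· ≤ ·) ws nws) :
    padRow nws (padRow ws r) = padRow nws r := by
  unfold padRow
  induction hmono generalizing r with
  | nil => simp
  | cons hle _ ih =>
    cases r with
    | nil => simp
    | cons c r => simp [ih, ljust_ljust _ _ _ hle]

theorem wstep_mono (ws : List Int) (row : List String) (h : row.length = ws.length) :
    List.Forall₂ (· ≤ ·) ws (wstep ws row) := by
  unfold wstep
  induction ws generalizing row with
  | nil => simp
  | cons w ws ih =>
    cases row with
    | nil => simp at h
    | cons c r =>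
      simp only [List.zipWith_cons_cons]
      exact List.Forall₂.cons (le_max_left _ _) (ih r (by simpa using h))

theorem wstep_length (ws : List Int) (row : List String) (h : row.length = ws.length) :
    (wstep ws row).length = ws.length := by
  simp [wstep, h]

-- invariant of B's online loop: after folding `rs` from state (acc padded to ws, ws),
-- every row (old and new) ends padded to the final widths
theorem foldl_bstep_eq (rs : List (List String)) (ws : List Int)
    (acc : List (List String)) (h : ∀ r ∈ rs, r.length = ws.length) :
    rs.foldl bstep (acc.map (padRow ws), ws)
      = ((acc ++ rs).map (padRow (rs.foldl wstep ws)), rs.foldl wstep ws) := by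
  induction rs generalizing ws acc with
  | nil => simp
  | cons r rs ih =>
    have hr : r.length = ws.length := h r (by simp)
    have hmono := wstep_mono ws r hr
    have hlen := wstep_length ws r hr
    have htail : ∀ r' ∈ rs, r'.length = (wstep ws r).length := by
      intro r' hr'; rw [hlen]; exact h r' (by simp [hr'])
    simp only [List.foldl_cons]
    by_cases hne : wstep ws r ≠ ws
    · have hb : bstep (acc.map (padRow ws), ws) r
          = ((acc ++ [r]).map (padRow (wstep ws r)), wstep ws r) := by
        simp only [bstep]
        rw [if_pos hne]
        simp only [List.map_append, List.map_map, List.map_cons, List.map_nil,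
          Function.comp_def]
        rw [List.map_congr_left (fun x _ => padRow_padRow ws (wstep ws r) x hmono)]
      rw [hb, ih (wstep ws r) (acc ++ [r]) htail]
      simp
    · simp only [ne_eq, not_not] at hne
      have hb : bstep (acc.map (padRow ws), ws) r
          = ((acc ++ [r]).map (padRow ws), ws) := by
        simp [bstep, hne]
      have htail' : ∀ r' ∈ rs, r'.length = ws.length :=
        fun r' hr' => (htail r' hr').trans (by rw [hne])
      rw [hb, ih ws (acc ++ [r]) htail']
      simp [hne]

theorem set_ofList_const (l : List Int) (x : Int) (h : ∀ y ∈ l, y = x) :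
    PySem.Set.ofList (x :: l) = [x] := by
  rw [PySem.Set.ofList_eq_foldl]
  simp only [List.foldl_cons]
  have hx : PySem.Set.add [] x = [x] := rfl
  rw [hx]
  induction l with
  | nil => rfl
  | cons y ys ih =>
    have hy : y = x := h y (by simp)
    simp only [List.foldl_cons, hy]
    rw [show PySem.Set.add [x] x = [x] by simp [PySem.Set.add, PySem.Set.contains]]
    exact ih (fun z hz => h z (by simp [hz]))

theorem guard_eq_one (r : List String) (rest : List (List String))
    (h : ∀ s ∈ r :: rest, s.length = r.length) :
    (PySem.Set.ofList ((r :: rest).map (fun s => (s.length : Int)))).length = 1 := by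
  simp only [List.map_cons]
  rw [set_ofList_const (rest.map (fun s => (s.length : Int))) (r.length : Int)
    (by intro y hy
        simp only [List.mem_map] at hy
        obtain ⟨s, hs, rfl⟩ := hy
        exact_mod_cast h s (by simp [hs]))]
  rfl

-- ===== VERDICT (by name: the statement is the Claim_ definition above) =====
theorem align_rows_spec : Claim_equal_align_rows := by
  intro rows _ hpre
  obtain ⟨hne, hall⟩ := hpre
  cases rows with
  | nil => exact absurd rfl hne
  | cons r rest =>
    simp only [List.headD_cons] at hall
    show align_rows (r :: rest) = align_rows_alt (r :: rest)
    unfold align_rows align_rows_alt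
    simp only [guard_eq_one r rest hall, ne_eq, not_true_eq_false, List.headD_cons, if_false]
    have hB := foldl_bstep_eq (r :: rest) (List.replicate r.length 0) []
      (by intro r' hr'; simpa using hall r' hr')
    simp only [List.map_nil, List.nil_append] at hB
    rw [hB, widths_eq r rest]
    dsimp only
    apply List.map_congr_left
    intro row _
    unfold padRow
    rw [List.zipWith_comm]
    congr 1
    funext c w
    exact (ljust_eq_pad c w).symm
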